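-- pv_equiv track=rewrite | github.com/Hardcoreprawn/azure-workflow-for-kml-satellite | treesight/security/url.py | host_in_allowlist
-- ===== SOURCE A (Python) =====
-- def host_in_allowlist(hostname: str, allowed: frozenset[str]) -> bool:
--     """Return True if *hostname* matches any entry in *allowed* (exact or subdomain).
--
--     Instead of looping over every allowlist entry with ``host_matches``,
--     this walks up the domain hierarchy and does **O(depth)** set lookups
--     (where depth is the number of dot-separated labels, typically 2–4).
--
--     >>> allowed = frozenset({"example.com", "other.org"})
--     >>> host_in_allowlist("cdn.example.com", allowed)
--     True
--     >>> host_in_allowlist("example.com", allowed)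
--     True
--     >>> host_in_allowlist("evil-example.com", allowed)
--     False
--     >>> host_in_allowlist("", allowed)
--     False
--     """
--     h = hostname.lower()
--     if not h:
--         return False
--     if h in allowed:
--         return True
--     parts = h.split(".")
--     for i in range(1, len(parts)):
--         parent = ".".join(parts[i:])
--         if parent in allowed:
--             return True
--     return False
-- ===== SOURCE B (Python) =====
-- def host_in_allowlist(hostname: str, allowed) -> bool:
--     h = hostname.lower()
--     if not h:
--         return False
--     for entry in allowed:
--         if h == entry or h.endswith("." + entry):
--             return True
--     return False
-- ===== Notes on version B (the rewrite author's own statement) =====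
-- stated objective: simpler
-- what changed: B scans the allowlist entries once, testing each with an equality or dot-prefixed endswith, instead of walking up the hostname's label hierarchy rebuilding each parent suffix with split/join and set lookups.
import Mathlib
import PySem

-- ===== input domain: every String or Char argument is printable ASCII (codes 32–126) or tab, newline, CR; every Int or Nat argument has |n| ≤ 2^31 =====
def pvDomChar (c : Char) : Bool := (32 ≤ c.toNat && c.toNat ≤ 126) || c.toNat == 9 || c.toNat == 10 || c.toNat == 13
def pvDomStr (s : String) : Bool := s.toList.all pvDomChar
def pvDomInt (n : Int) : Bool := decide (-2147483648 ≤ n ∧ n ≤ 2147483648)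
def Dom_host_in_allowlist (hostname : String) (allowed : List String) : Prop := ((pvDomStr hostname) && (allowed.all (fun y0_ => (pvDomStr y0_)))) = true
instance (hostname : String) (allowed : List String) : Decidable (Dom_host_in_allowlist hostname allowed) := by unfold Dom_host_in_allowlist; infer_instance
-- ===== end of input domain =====

-- B replaces A's walk up the hostname's label hierarchy (split/join + set lookups) by a single
-- scan of the allowlist with an equality-or-dot-suffix test per entry (objective: simpler).

-- ===== PORT A =====
def host_in_allowlist (hostname : String) (allowed : List String) : Bool :=
  let h := PySem.Str.lower hostname
  if h = "" then false
  else if allowed.contains h then true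
  else
    let parts := (PySem.Str.split? h ".").getD []
    (PySem.List.pyRange 1 (parts.length : Int)).any fun i =>
      allowed.contains (PySem.Str.join "." (PySem.List.slice parts (some i) none))

-- ===== PORT B =====
def host_in_allowlist_alt (hostname : String) (allowed : List String) : Bool :=
  let h := PySem.Str.lower hostname
  if h = "" then false
  else allowed.any fun entry => h == entry || PySem.Str.endswith h ("." ++ entry)

-- ===== PRECONDITION & SPEC =====
def Spec_host_in_allowlist (hostname : String) (allowed : List String) (out : Bool) : Prop := out = host_in_allowlist_alt hostname allowed
instance (hostname : String) (allowed : List String) (out : Bool) : Decidable (Spec_host_in_allowlist hostname allowed out) := by unfold Spec_host_in_allowlist; infer_instance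

-- ===== CLAIM (what is proved, stated in full; the proofs are below) =====
def Claim_equal_host_in_allowlist : Prop := ∀ (hostname : String) (allowed : List String), Dom_host_in_allowlist hostname allowed → Spec_host_in_allowlist hostname allowed (host_in_allowlist hostname allowed)

-- ===== LEMMAS AND PROOFS =====

def mySplit (c : Char) : List Char → List (List Char)
  | [] => [[]]
  | a :: t => if a = c then [] :: mySplit c t else (mySplit c t).modifyHead (a :: ·)

theorem mySplit_ne_nil (c : Char) (l : List Char) : mySplit c l ≠ [] := by
  cases l with
  | nil => simp [mySplit]
  | cons a t =>
    simp only [mySplit]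
    split
    · simp
    · have := mySplit_ne_nil c t
      cases hm : mySplit c t with
      | nil => exact absurd hm this
      | cons q qs => simp [hm, List.modifyHead]

theorem go_eq_mySplit (c : Char) : ∀ (fuel : Nat) (l cur : List Char) (acc : List (List Char)),
    l.length ≤ fuel →
    PySem.Chars.splitOn.go [c] fuel l cur acc
      = acc.reverse ++ (mySplit c l).modifyHead (cur.reverse ++ ·) := by
  intro fuel
  induction fuel with
  | zero =>
    intro l cur acc h
    have : l = [] := List.eq_nil_of_length_eq_zero (Nat.le_zero.mp h)
    subst this
    rw [PySem.Chars.splitOn.go.eq_def]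
    simp [mySplit]
  | succ n ih =>
    intro l cur acc h
    cases l with
    | nil =>
      rw [PySem.Chars.splitOn.go.eq_def]
      simp [mySplit]
    | cons a rest =>
      rw [PySem.Chars.splitOn.go.eq_def]
      simp only [List.isPrefixOf, List.isPrefixOf_nil_left]  -- reduce ['.'] isPrefixOf (a::rest)
      by_cases hac : a = c
      · subst hac
        simp only [beq_self_eq_true, Bool.true_and, if_pos]
        simp only [List.length_cons, List.drop_succ_cons, List.length_nil, List.drop_zero]
        rw [ih rest [] (cur.reverse :: acc) (by simpa using Nat.lt_succ_iff.mp (by simpa using h))]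
        simp only [mySplit, if_pos rfl, List.modifyHead]
        cases hm : mySplit a rest with
        | nil => exact absurd hm (mySplit_ne_nil a rest)
        | cons q qs => simp
      · have : (c == a) = false := by simp [beq_eq_false_iff_ne]; exact fun e => hac e.symm
        simp only [this, Bool.false_and, if_neg Bool.false_ne_true]
        rw [ih rest (a :: cur) acc (by simpa using Nat.lt_succ_iff.mp (by simpa using h))]
        simp only [mySplit, if_neg hac]
        cases hm : mySplit c rest with
        | nil => exact absurd hm (mySplit_ne_nil c rest)
        | cons q qs => simp [List.modifyHead]

theorem splitOn_eq_mySplit (c : Char) (l : List Char) :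
    PySem.Chars.splitOn l [c] = mySplit c l := by
  unfold PySem.Chars.splitOn
  rw [go_eq_mySplit c (l.length + 1) l [] [] (Nat.le_succ _)]
  cases hm : mySplit c l with
  | nil => exact absurd hm (mySplit_ne_nil c l)
  | cons q qs => simp [List.modifyHead]


theorem ic_cons_cons (s p q : List Char) (t : List (List Char)) :
    s.intercalate (p :: q :: t) = p ++ s ++ s.intercalate (q :: t) := by
  simp [List.intercalate, List.intersperse]

theorem ic_single (s p : List Char) : s.intercalate [p] = p := by
  simp [List.intercalate]

theorem intercalate_mySplit (c : Char) (l : List Char) :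
    [c].intercalate (mySplit c l) = l := by
  induction l with
  | nil => simp [mySplit, ic_single]
  | cons a t ih =>
    by_cases hac : a = c
    · subst hac
      cases hm : mySplit a t with
      | nil => exact absurd hm (mySplit_ne_nil a t)
      | cons q qs =>
        rw [hm] at ih
        simp only [mySplit, hm, ite_true]
        rw [ic_cons_cons]
        simpa using ih
    · simp only [mySplit, if_neg hac]
      cases hm : mySplit c t with
      | nil => exact absurd hm (mySplit_ne_nil c t)
      | cons q qs =>
        rw [hm] at ih
        simp only [List.modifyHead]
        cases qs with
        | nil => rw [ic_single] at ih ⊢; simp [ih]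
        | cons r rs =>
          rw [ic_cons_cons] at ih ⊢
          simp [← ih]

theorem not_mem_mySplit (c : Char) (l : List Char) : ∀ p ∈ mySplit c l, c ∉ p := by
  induction l with
  | nil => simp [mySplit]
  | cons a t ih =>
    by_cases hac : a = c
    · subst hac
      simp only [mySplit, ite_true]
      intro p hp
      rcases List.mem_cons.mp hp with h | h
      · subst h; simp
      · exact ih p h
    · simp only [mySplit, if_neg hac]
      cases hm : mySplit c t with
      | nil => exact absurd hm (mySplit_ne_nil c t)
      | cons q qs =>
        rw [hm] at ih
        intro p hp
        simp only [List.modifyHead] at hp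
        rcases List.mem_cons.mp hp with h1 | h2
        · subst h1
          intro hmem
          rcases List.mem_cons.mp hmem with h | h
          · exact hac h.symm
          · exact ih q (List.mem_cons_self) h
        · exact ih p (List.mem_cons_of_mem _ h2)

theorem suffix_char_of_long {p t e : List Char} {c : Char}
    (hsuf : (c :: e) <:+ p ++ c :: t) (hlen : t.length < e.length) : c ∈ p := by
  obtain ⟨pre, hpre⟩ := hsuf
  have hl : pre.length < p.length := by
    have := congrArg List.length hpre
    simp at this
    omega
  have h1 : (p ++ c :: t)[pre.length]'(by simp; omega) = c := by
    simp only [← hpre]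
    rw [List.getElem_append_right (le_refl _)]
    simp
  have h2 : (p ++ c :: t)[pre.length]'(by simp; omega) = p[pre.length] :=
    List.getElem_append_left hl
  exact (h2.symm.trans h1) ▸ List.getElem_mem hl

theorem suffix_cons_of_lt {l e : List Char} {c : Char}
    (h : (c :: e) <:+ (c :: l)) (hlen : e.length < l.length) : (c :: e) <:+ l := by
  obtain ⟨pre, hpre⟩ := h
  cases pre with
  | nil =>
    have := congrArg List.length hpre
    simp at this
    omega
  | cons x xs =>
    exact ⟨xs, (by simpa using hpre : x = c ∧ xs ++ c :: e = l).2⟩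

theorem suf_iff (c : Char) (e : List Char) : ∀ (P : List (List Char)), P ≠ [] →
    (∀ p ∈ P, c ∉ p) →
    ((∃ j : Nat, 1 ≤ j ∧ j < P.length ∧ [c].intercalate (P.drop j) = e)
      ↔ (c :: e) <:+ [c].intercalate P) := by
  intro P
  induction P with
  | nil => intro h; exact absurd rfl h
  | cons p Q ih =>
    intro _ hc
    cases Q with
    | nil =>
      rw [ic_single]
      constructor
      · rintro ⟨j, h1, h2, -⟩; simp at h2; omega
      · intro hsuf
        exact absurd (hsuf.subset (List.mem_cons_self)) (hc p (List.mem_cons_self))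
    | cons q tl =>
      have hfull : [c].intercalate (p :: q :: tl) = p ++ c :: [c].intercalate (q :: tl) := by
        rw [ic_cons_cons]; simp
      set t := [c].intercalate (q :: tl) with ht
      rw [hfull]
      have ihq := ih (by simp) (fun r hr => hc r (List.mem_cons_of_mem _ hr))
      constructor
      · rintro ⟨j, h1, h2, h3⟩
        obtain ⟨k, rfl⟩ : ∃ k, j = k + 1 := ⟨j - 1, by omega⟩
        simp only [List.drop_succ_cons] at h3
        cases Nat.eq_zero_or_pos k with
        | inl hk0 =>
          subst hk0
          simp at h3
          rw [← ht] at h3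
          rw [← h3]
          exact List.suffix_append p (c :: t)
        | inr hkpos =>
          have : (c :: e) <:+ t := (ihq.mp ⟨k, hkpos, by simp at h2 ⊢; omega, h3⟩)
          exact this.trans ((List.suffix_cons c t).trans (List.suffix_append p (c :: t)))
      · intro hsuf
        rcases lt_trichotomy e.length t.length with hlt | heq | hgt
        · have hct : (c :: t) <:+ p ++ c :: t := List.suffix_append p (c :: t)
          have : (c :: e) <:+ (c :: t) :=
            List.suffix_of_suffix_length_le hsuf hct (by simp; omega)
          have : (c :: e) <:+ t := suffix_cons_of_lt this hlt
          obtain ⟨k, hk1, hk2, hk3⟩ := ihq.mpr this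
          exact ⟨k + 1, by omega, by simp at hk2 ⊢; omega, by simpa using hk3⟩
        · obtain ⟨pre1, hp1⟩ := hsuf
          have hlenp : pre1.length = p.length := by
            have := congrArg List.length hp1; simp at this; omega
          have := List.append_inj_right hp1 (by simp [hlenp])
          have he : e = t := by simpa using this
          exact ⟨1, le_refl _, by simp, by simpa using he.symm⟩
        · exact absurd (suffix_char_of_long hsuf hgt) (hc p (List.mem_cons_self))

theorem join_map (j : Nat) (P : List (List Char)) :
    PySem.Str.join "." (List.drop j (List.map String.ofList P))
      = String.ofList (['.'].intercalate (P.drop j)) := by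
  rw [PySem.Str.join, ← List.map_drop, List.map_map]
  congr 1
  have hc : (String.toList ∘ String.ofList) = id := funext (fun l => String.toList_ofList)
  simp [PySem.Chars.join, hc]

theorem core (h : String) (allowed : List String) :
    (if allowed.contains h then true
     else
       (PySem.List.pyRange 1 ((((PySem.Str.split? h ".").getD []).length : Int))).any fun i =>
         allowed.contains (PySem.Str.join "." (PySem.List.slice ((PySem.Str.split? h ".").getD []) (some i) none)))
    = allowed.any fun entry => h == entry || PySem.Str.endswith h ("." ++ entry) := by
  have hsplit : (PySem.Str.split? h ".").getD [] = List.map String.ofList (mySplit '.' h.toList) := by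
    simp [PySem.Str.split?, PySem.Chars.split?, splitOn_eq_mySplit]
  rw [hsplit]
  set P := mySplit '.' h.toList with hP
  have hPne : P ≠ [] := mySplit_ne_nil _ _
  have hPc : ∀ p ∈ P, '.' ∉ p := not_mem_mySplit _ _
  have hic : ['.'].intercalate P = h.toList := intercalate_mySplit _ _
  rw [Bool.eq_iff_iff]
  constructor
  · intro hA
    rw [List.any_eq_true]
    by_cases hcont : allowed.contains h = true
    · exact ⟨h, List.contains_iff_mem.mp hcont, by simp⟩
    · rw [if_neg hcont, List.any_eq_true] at hA
      obtain ⟨i, hi, hmem⟩ := hA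
      obtain ⟨hi1, hi2⟩ := PySem.List.mem_pyRange_one.mp hi
      rw [PySem.List.slice_from _ (by omega)] at hmem
      set j := i.toNat with hj
      have hj1 : 1 ≤ j := by omega
      have hj2 : j < P.length := by simp at hi2; omega
      rw [join_map] at hmem
      refine ⟨_, List.contains_iff_mem.mp hmem, ?_⟩
      rw [Bool.or_eq_true]
      right
      rw [PySem.Str.endswith_eq, PySem.Chars.endswith_iff]
      have : ('.' :: (String.ofList (['.'].intercalate (P.drop j))).toList) <:+ ['.'].intercalate P := by
        rw [String.toList_ofList]
        exact (suf_iff '.' _ P hPne hPc).mp ⟨j, hj1, hj2, rfl⟩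
      simpa [hic, String.toList_append] using this
  · intro hB
    rw [List.any_eq_true] at hB
    obtain ⟨e, hel, he⟩ := hB
    rw [Bool.or_eq_true] at he
    rcases he with he | he
    · rw [if_pos (List.contains_iff_mem.mpr (by rwa [eq_of_beq he]))]
    · rw [PySem.Str.endswith_eq, PySem.Chars.endswith_iff] at he
      have he' : ('.' :: e.toList) <:+ ['.'].intercalate P := by
        simpa [hic, String.toList_append] using he
      obtain ⟨j, hj1, hj2, hj3⟩ := (suf_iff '.' e.toList P hPne hPc).mpr he'
      have hval : PySem.Str.join "." (PySem.List.slice (List.map String.ofList P) (some (j : Int)) none) = e := by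
        rw [PySem.List.slice_from _ (by positivity)]
        simp only [Int.toNat_natCast]
        rw [join_map, hj3, String.ofList_toList]
      split
      · rfl
      · rw [List.any_eq_true]
        refine ⟨(j : Int), PySem.List.mem_pyRange_one.mpr ⟨by omega, by simp; omega⟩, ?_⟩
        rw [hval]
        exact List.contains_iff_mem.mpr hel


-- ===== VERDICT (by name: the statement is the Claim_ definition above) =====
theorem host_in_allowlist_spec : Claim_equal_host_in_allowlist := by
  intro hostname allowed _
  unfold Spec_host_in_allowlist host_in_allowlist host_in_allowlist_alt
  by_cases hh : PySem.Str.lower hostname = ""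
  · simp [hh]
  · simp only [if_neg hh]
    exact core (PySem.Str.lower hostname) allowed
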